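-- pv_equiv track=rewrite | github.com/civoranexus/aid105-Nitesh9842 | backend/recommender.py | check_caste_eligibility
-- ===== SOURCE A (Python) =====
-- def check_caste_eligibility(user_caste, scheme_target):
--     """
--     Check if user's caste category is eligible for the scheme.
--
--     Args:
--         user_caste: User's caste category (SC, ST, OBC, BC, General)
--         scheme_target: Scheme's target group text
--     """
--     # Normalize user caste
--     user_caste = user_caste.upper().strip()
--     if user_caste == "BC":
--         user_caste = "OBC"  # BC and OBC are same
--
--     # If scheme is for all citizens or eligible citizens, everyone is eligible
--     general_keywords = ["ALL CITIZENS", "ELIGIBLE CITIZENS", "ALL HOUSEHOLDS", "ALL"]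
--     if any(keyword in scheme_target for keyword in general_keywords):
--         return True
--
--     # Check for specific caste categories in target group
--     caste_keywords = {
--         "SC": ["SC", "SCHEDULED CASTE", "SCHEDULED CASTES"],
--         "ST": ["ST", "SCHEDULED TRIBE", "SCHEDULED TRIBES", "TRIBAL"],
--         "OBC": ["OBC", "BC", "OTHER BACKWARD", "BACKWARD CLASS", "BACKWARD CLASSES"],
--         "GENERAL": ["GENERAL", "UNRESERVED"]
--     }
--
--     # Check if scheme targets specific caste
--     scheme_castes = []
--     for caste, keywords in caste_keywords.items():
--         if any(keyword in scheme_target for keyword in keywords):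
--             scheme_castes.append(caste)
--
--     # If no specific caste mentioned, assume open to all
--     if not scheme_castes:
--         return True
--
--     # Check if user's caste matches scheme's target castes
--     return user_caste in scheme_castes
-- ===== SOURCE B (Python) =====
-- def check_caste_eligibility(user_caste, scheme_target):
--     """Text-driven scan: instead of testing each keyword with `in`, walk the
--     scheme_target once position by position, collecting the tags (general marker
--     or caste category) of every keyword that starts there, then decide."""
--     user_caste = user_caste.upper().strip()
--     if user_caste == "BC":
--         user_caste = "OBC"
--
--     tagged = [("ALL CITIZENS", None), ("ELIGIBLE CITIZENS", None),
--               ("ALL HOUSEHOLDS", None), ("ALL", None),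
--               ("SC", "SC"), ("SCHEDULED CASTE", "SC"), ("SCHEDULED CASTES", "SC"),
--               ("ST", "ST"), ("SCHEDULED TRIBE", "ST"), ("SCHEDULED TRIBES", "ST"),
--               ("TRIBAL", "ST"),
--               ("OBC", "OBC"), ("BC", "OBC"), ("OTHER BACKWARD", "OBC"),
--               ("BACKWARD CLASS", "OBC"), ("BACKWARD CLASSES", "OBC"),
--               ("GENERAL", "GENERAL"), ("UNRESERVED", "GENERAL")]
--
--     hits = set()
--     for i in range(len(scheme_target)):
--         for kw, tag in tagged:
--             if scheme_target.startswith(kw, i):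
--                 hits.add(tag)
--
--     if None in hits:          # a general keyword occurred somewhere
--         return True
--     if user_caste in hits:    # the user's own category is targeted
--         return True
--     return not hits           # no category mentioned at all -> open to all
-- ===== Notes on version B (the rewrite author's own statement) =====
-- stated objective: alternative
-- what changed: A tests every keyword of every category against the text with 'kw in scheme_target' and accumulates a scheme_castes list; B instead walks scheme_target once position by position, collecting into a set the tags (general marker / caste category) of every keyword that starts at each position, and decides eligibility from that tag set.
import Mathlib
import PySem

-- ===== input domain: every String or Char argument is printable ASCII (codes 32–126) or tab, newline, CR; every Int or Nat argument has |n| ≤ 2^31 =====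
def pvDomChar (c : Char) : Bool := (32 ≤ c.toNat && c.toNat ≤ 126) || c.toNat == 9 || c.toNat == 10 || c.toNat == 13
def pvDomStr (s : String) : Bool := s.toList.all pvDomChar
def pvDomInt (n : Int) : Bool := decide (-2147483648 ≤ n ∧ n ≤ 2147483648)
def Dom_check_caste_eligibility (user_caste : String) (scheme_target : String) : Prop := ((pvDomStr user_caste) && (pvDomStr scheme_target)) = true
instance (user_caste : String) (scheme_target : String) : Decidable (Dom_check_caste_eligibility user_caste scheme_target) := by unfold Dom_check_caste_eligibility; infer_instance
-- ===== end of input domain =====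

-- B replaces A's per-keyword substring tests ('kw in scheme_target' for every keyword of every
-- category) by one position-by-position scan of scheme_target that collects the tags of all
-- keywords starting at each position, then decides from the collected tag set; objective:
-- alternative (text-driven scan vs keyword-driven membership tests), same result on all inputs.

-- ===== PORT A =====
def pvGeneralKeywords : List String := ["ALL CITIZENS", "ELIGIBLE CITIZENS", "ALL HOUSEHOLDS", "ALL"]
def pvCasteKeywords : List (String × List String) :=
  [("SC", ["SC", "SCHEDULED CASTE", "SCHEDULED CASTES"]),
   ("ST", ["ST", "SCHEDULED TRIBE", "SCHEDULED TRIBES", "TRIBAL"]),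
   ("OBC", ["OBC", "BC", "OTHER BACKWARD", "BACKWARD CLASS", "BACKWARD CLASSES"]),
   ("GENERAL", ["GENERAL", "UNRESERVED"])]

def check_caste_eligibility (user_caste : String) (scheme_target : String) : Bool :=
  -- user_caste = user_caste.upper().strip(); if user_caste == "BC": user_caste = "OBC"
  let uc0 := PySem.Str.strip (PySem.Str.upper user_caste)
  let uc := if uc0 == "BC" then "OBC" else uc0
  -- if any(keyword in scheme_target for keyword in general_keywords): return True
  if pvGeneralKeywords.any (fun k => PySem.Str.isIn k scheme_target) then
    true
  else
    -- for caste, keywords in caste_keywords.items(): if any(...): scheme_castes.append(caste)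
    let scheme_castes := pvCasteKeywords.foldl
      (fun acc p => if p.2.any (fun k => PySem.Str.isIn k scheme_target) then acc ++ [p.1] else acc) []
    -- if not scheme_castes: return True;  return user_caste in scheme_castes
    if scheme_castes.isEmpty then true
    else scheme_castes.contains uc

-- ===== PORT B =====
-- flat (keyword, tag) list: tag none = general keyword (everyone eligible), some c = caste category
def pvTagged : List (String × Option String) :=
  [("ALL CITIZENS", none), ("ELIGIBLE CITIZENS", none), ("ALL HOUSEHOLDS", none), ("ALL", none),
   ("SC", some "SC"), ("SCHEDULED CASTE", some "SC"), ("SCHEDULED CASTES", some "SC"),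
   ("ST", some "ST"), ("SCHEDULED TRIBE", some "ST"), ("SCHEDULED TRIBES", some "ST"),
   ("TRIBAL", some "ST"),
   ("OBC", some "OBC"), ("BC", some "OBC"), ("OTHER BACKWARD", some "OBC"),
   ("BACKWARD CLASS", some "OBC"), ("BACKWARD CLASSES", some "OBC"),
   ("GENERAL", some "GENERAL"), ("UNRESERVED", some "GENERAL")]

-- hits = set(); for i in range(len(scheme_target)): for kw, tag in tagged:
--   if scheme_target.startswith(kw, i): hits.add(tag)
-- (scheme_target.startswith(kw, i) with 0 ≤ i, as every i of range(len) is, is exactly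
--  'kw is a prefix of scheme_target[i:]' = PySem.Chars.startswith of the dropped list)
def pvScan (scheme_target : String) : PySem.Set (Option String) :=
  (PySem.List.pyRange 0 (PySem.Str.len scheme_target) 1).foldl
    (fun s i => pvTagged.foldl
      (fun s p => if PySem.Chars.startswith (scheme_target.toList.drop i.toNat) p.1.toList
                  then PySem.Set.add s p.2 else s) s)
    PySem.Set.empty

def check_caste_eligibility_alt (user_caste : String) (scheme_target : String) : Bool :=
  let uc0 := PySem.Str.strip (PySem.Str.upper user_caste)
  let uc := if uc0 == "BC" then "OBC" else uc0
  let hits := pvScan scheme_target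
  -- if None in hits: return True
  if hits.contains none then true
  -- if user_caste in hits: return True
  else if hits.contains (some uc) then true
  -- return not hits
  else hits.isEmpty

-- ===== PRECONDITION & SPEC =====
def Spec_check_caste_eligibility (user_caste : String) (scheme_target : String) (out : Bool) : Prop := out = check_caste_eligibility_alt user_caste scheme_target
instance (user_caste : String) (scheme_target : String) (out : Bool) : Decidable (Spec_check_caste_eligibility user_caste scheme_target out) := by unfold Spec_check_caste_eligibility; infer_instance

-- ===== CLAIM (what is proved, stated in full; the proofs are below) =====
def Claim_equal_check_caste_eligibility : Prop := ∀ (user_caste : String) (scheme_target : String), Dom_check_caste_eligibility user_caste scheme_target → Spec_check_caste_eligibility user_caste scheme_target (check_caste_eligibility user_caste scheme_target)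

-- ===== LEMMAS AND PROOFS =====

-- membership in the inner fold (one text position, all tagged keywords)
theorem pv_mem_inner (c : List Char → Bool) (l : List (String × Option String))
    (s : PySem.Set (Option String)) (t : Option String) :
    t ∈ l.foldl (fun s p => if c p.1.toList then PySem.Set.add s p.2 else s) s ↔
      t ∈ s ∨ ∃ p ∈ l, c p.1.toList = true ∧ p.2 = t := by
  induction l generalizing s with
  | nil => simp
  | cons p l ih =>
    simp only [List.foldl_cons, List.mem_cons]
    by_cases h : c p.1.toList = true
    · rw [if_pos h, ih]
      simp only [PySem.Set.mem_add]
      constructor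
      · rintro (⟨hs | he⟩ | ⟨q, hq, hc, ht⟩)
        · exact Or.inl hs
        · exact Or.inr ⟨p, Or.inl rfl, h, he.symm⟩
        · exact Or.inr ⟨q, Or.inr hq, hc, ht⟩
      · rintro (hs | ⟨q, (rfl | hq), hc, ht⟩)
        · exact Or.inl (Or.inl hs)
        · exact Or.inl (Or.inr ht.symm)
        · exact Or.inr ⟨q, hq, hc, ht⟩
    · rw [if_neg h, ih]
      constructor
      · rintro (hs | ⟨q, hq, hc, ht⟩)
        · exact Or.inl hs
        · exact Or.inr ⟨q, Or.inr hq, hc, ht⟩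
      · rintro (hs | ⟨q, (rfl | hq), hc, ht⟩)
        · exact Or.inl hs
        · exact absurd hc h
        · exact Or.inr ⟨q, hq, hc, ht⟩

-- membership in the outer fold (all text positions)
theorem pv_mem_outer (st : List Char) (is : List Int)
    (s : PySem.Set (Option String)) (t : Option String) :
    t ∈ is.foldl (fun s i => pvTagged.foldl
        (fun s p => if PySem.Chars.startswith (st.drop i.toNat) p.1.toList
                    then PySem.Set.add s p.2 else s) s) s ↔
      t ∈ s ∨ ∃ i ∈ is, ∃ p ∈ pvTagged,
        PySem.Chars.startswith (st.drop i.toNat) p.1.toList = true ∧ p.2 = t := by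
  induction is generalizing s with
  | nil => simp
  | cons i is ih =>
    simp only [List.foldl_cons, List.mem_cons]
    rw [ih, pv_mem_inner]
    constructor
    · rintro ((hs | ⟨p, hp, hc, ht⟩) | ⟨j, hj, hrest⟩)
      · exact Or.inl hs
      · exact Or.inr ⟨i, Or.inl rfl, p, hp, hc, ht⟩
      · exact Or.inr ⟨j, Or.inr hj, hrest⟩
    · rintro (hs | ⟨j, (rfl | hj), hrest⟩)
      · exact Or.inl (Or.inl hs)
      · exact Or.inl (Or.inr hrest)
      · exact Or.inr ⟨j, hj, hrest⟩

-- a nonempty keyword starts at some scanned position iff it is a substring (Python 'kw in s')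
theorem pv_hit_iff (st kw : String) (h : kw.toList ≠ []) :
    (∃ i ∈ PySem.List.pyRange 0 (PySem.Str.len st) 1,
        PySem.Chars.startswith (st.toList.drop i.toNat) kw.toList = true) ↔
      PySem.Str.isIn kw st = true := by
  simp only [PySem.Str.isIn_eq]
  rw [← PySem.Chars.exists_prefix_drop_iff_isIn]
  constructor
  · rintro ⟨i, _, hs⟩
    exact ⟨i.toNat, (PySem.Chars.startswith_iff _ _).1 hs⟩
  · rintro ⟨j, hpre⟩
    by_cases hj : st.toList.length ≤ j
    · rw [List.drop_eq_nil_of_le hj] at hpre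
      exact absurd (List.prefix_nil.mp hpre) h
    · rw [not_le] at hj
      refine ⟨(j : Int), ?_, ?_⟩
      · rw [PySem.List.mem_pyRange_one, PySem.Str.len_eq]
        exact ⟨Int.natCast_nonneg j, by exact_mod_cast hj⟩
      · rw [Int.toNat_natCast]
        exact (PySem.Chars.startswith_iff _ _).2 hpre

-- every keyword in the tagged table is nonempty
theorem pv_tagged_ne (p : String × Option String) (hp : p ∈ pvTagged) : p.1.toList ≠ [] := by
  fin_cases hp <;> decide

-- a tag is collected by the scan iff one of its keywords is a substring of scheme_target
theorem pv_mem_scan (st : String) (t : Option String) :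
    t ∈ pvScan st ↔ ∃ p ∈ pvTagged, PySem.Str.isIn p.1 st = true ∧ p.2 = t := by
  unfold pvScan
  rw [pv_mem_outer]
  simp only [PySem.Set.empty, List.not_mem_nil, false_or]
  constructor
  · rintro ⟨i, hi, p, hp, hs, ht⟩
    exact ⟨p, hp, (pv_hit_iff st p.1 (pv_tagged_ne p hp)).1 ⟨i, hi, hs⟩, ht⟩
  · rintro ⟨p, hp, hin, ht⟩
    obtain ⟨i, hi, hs⟩ := (pv_hit_iff st p.1 (pv_tagged_ne p hp)).2 hin
    exact ⟨i, hi, p, hp, hs, ht⟩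

-- the none tag is collected iff one of A's general keywords is a substring
theorem pv_scan_none (st : String) :
    (none ∈ pvScan st) ↔ ∃ k ∈ pvGeneralKeywords, PySem.Str.isIn k st = true := by
  rw [pv_mem_scan]
  simp only [pvTagged, pvGeneralKeywords, List.mem_cons, List.not_mem_nil, or_false,
    or_and_right, exists_or, exists_eq_left]
  simp

-- a some tag is collected iff that caste category has a matching keyword in A's table
theorem pv_scan_some (st : String) (c : String) :
    (some c ∈ pvScan st) ↔
      ∃ q ∈ pvCasteKeywords, (q.2.any (fun k => PySem.Str.isIn k st)) = true ∧ q.1 = c := by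
  rw [pv_mem_scan]
  constructor
  · rintro ⟨p, hp, hin, ht⟩
    simp only [pvTagged, List.mem_cons, List.not_mem_nil, or_false] at hp
    rcases hp with rfl|rfl|rfl|rfl|rfl|rfl|rfl|rfl|rfl|rfl|rfl|rfl|rfl|rfl|rfl|rfl|rfl|rfl
    · exact (nomatch ht)
    · exact (nomatch ht)
    · exact (nomatch ht)
    · exact (nomatch ht)
    · exact ⟨("SC", ["SC", "SCHEDULED CASTE", "SCHEDULED CASTES"]), by simp [pvCasteKeywords],
        by simp only [List.any_eq_true]; exact ⟨"SC", by simp, hin⟩, Option.some_inj.mp ht⟩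
    · exact ⟨("SC", ["SC", "SCHEDULED CASTE", "SCHEDULED CASTES"]), by simp [pvCasteKeywords],
        by simp only [List.any_eq_true]; exact ⟨"SCHEDULED CASTE", by simp, hin⟩, Option.some_inj.mp ht⟩
    · exact ⟨("SC", ["SC", "SCHEDULED CASTE", "SCHEDULED CASTES"]), by simp [pvCasteKeywords],
        by simp only [List.any_eq_true]; exact ⟨"SCHEDULED CASTES", by simp, hin⟩, Option.some_inj.mp ht⟩
    · exact ⟨("ST", ["ST", "SCHEDULED TRIBE", "SCHEDULED TRIBES", "TRIBAL"]), by simp [pvCasteKeywords],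
        by simp only [List.any_eq_true]; exact ⟨"ST", by simp, hin⟩, Option.some_inj.mp ht⟩
    · exact ⟨("ST", ["ST", "SCHEDULED TRIBE", "SCHEDULED TRIBES", "TRIBAL"]), by simp [pvCasteKeywords],
        by simp only [List.any_eq_true]; exact ⟨"SCHEDULED TRIBE", by simp, hin⟩, Option.some_inj.mp ht⟩
    · exact ⟨("ST", ["ST", "SCHEDULED TRIBE", "SCHEDULED TRIBES", "TRIBAL"]), by simp [pvCasteKeywords],
        by simp only [List.any_eq_true]; exact ⟨"SCHEDULED TRIBES", by simp, hin⟩, Option.some_inj.mp ht⟩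
    · exact ⟨("ST", ["ST", "SCHEDULED TRIBE", "SCHEDULED TRIBES", "TRIBAL"]), by simp [pvCasteKeywords],
        by simp only [List.any_eq_true]; exact ⟨"TRIBAL", by simp, hin⟩, Option.some_inj.mp ht⟩
    · exact ⟨("OBC", ["OBC", "BC", "OTHER BACKWARD", "BACKWARD CLASS", "BACKWARD CLASSES"]), by simp [pvCasteKeywords],
        by simp only [List.any_eq_true]; exact ⟨"OBC", by simp, hin⟩, Option.some_inj.mp ht⟩
    · exact ⟨("OBC", ["OBC", "BC", "OTHER BACKWARD", "BACKWARD CLASS", "BACKWARD CLASSES"]), by simp [pvCasteKeywords],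
        by simp only [List.any_eq_true]; exact ⟨"BC", by simp, hin⟩, Option.some_inj.mp ht⟩
    · exact ⟨("OBC", ["OBC", "BC", "OTHER BACKWARD", "BACKWARD CLASS", "BACKWARD CLASSES"]), by simp [pvCasteKeywords],
        by simp only [List.any_eq_true]; exact ⟨"OTHER BACKWARD", by simp, hin⟩, Option.some_inj.mp ht⟩
    · exact ⟨("OBC", ["OBC", "BC", "OTHER BACKWARD", "BACKWARD CLASS", "BACKWARD CLASSES"]), by simp [pvCasteKeywords],
        by simp only [List.any_eq_true]; exact ⟨"BACKWARD CLASS", by simp, hin⟩, Option.some_inj.mp ht⟩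
    · exact ⟨("OBC", ["OBC", "BC", "OTHER BACKWARD", "BACKWARD CLASS", "BACKWARD CLASSES"]), by simp [pvCasteKeywords],
        by simp only [List.any_eq_true]; exact ⟨"BACKWARD CLASSES", by simp, hin⟩, Option.some_inj.mp ht⟩
    · exact ⟨("GENERAL", ["GENERAL", "UNRESERVED"]), by simp [pvCasteKeywords],
        by simp only [List.any_eq_true]; exact ⟨"GENERAL", by simp, hin⟩, Option.some_inj.mp ht⟩
    · exact ⟨("GENERAL", ["GENERAL", "UNRESERVED"]), by simp [pvCasteKeywords],
        by simp only [List.any_eq_true]; exact ⟨"UNRESERVED", by simp, hin⟩, Option.some_inj.mp ht⟩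
  · rintro ⟨q, hq, ha, rfl⟩
    simp only [pvCasteKeywords, List.mem_cons, List.not_mem_nil, or_false] at hq
    rw [List.any_eq_true] at ha
    obtain ⟨k, hk, hin⟩ := ha
    rcases hq with rfl|rfl|rfl|rfl <;>
      (simp only [List.mem_cons, List.not_mem_nil, or_false] at hk) <;>
      [(rcases hk with rfl|rfl|rfl);(rcases hk with rfl|rfl|rfl|rfl);
       (rcases hk with rfl|rfl|rfl|rfl|rfl);(rcases hk with rfl|rfl)]
    · exact ⟨("SC", some "SC"), by simp [pvTagged], hin, rfl⟩
    · exact ⟨("SCHEDULED CASTE", some "SC"), by simp [pvTagged], hin, rfl⟩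
    · exact ⟨("SCHEDULED CASTES", some "SC"), by simp [pvTagged], hin, rfl⟩
    · exact ⟨("ST", some "ST"), by simp [pvTagged], hin, rfl⟩
    · exact ⟨("SCHEDULED TRIBE", some "ST"), by simp [pvTagged], hin, rfl⟩
    · exact ⟨("SCHEDULED TRIBES", some "ST"), by simp [pvTagged], hin, rfl⟩
    · exact ⟨("TRIBAL", some "ST"), by simp [pvTagged], hin, rfl⟩
    · exact ⟨("OBC", some "OBC"), by simp [pvTagged], hin, rfl⟩
    · exact ⟨("BC", some "OBC"), by simp [pvTagged], hin, rfl⟩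
    · exact ⟨("OTHER BACKWARD", some "OBC"), by simp [pvTagged], hin, rfl⟩
    · exact ⟨("BACKWARD CLASS", some "OBC"), by simp [pvTagged], hin, rfl⟩
    · exact ⟨("BACKWARD CLASSES", some "OBC"), by simp [pvTagged], hin, rfl⟩
    · exact ⟨("GENERAL", some "GENERAL"), by simp [pvTagged], hin, rfl⟩
    · exact ⟨("UNRESERVED", some "GENERAL"), by simp [pvTagged], hin, rfl⟩

-- ===== VERDICT (by name: the statement is the Claim_ definition above) =====
set_option maxHeartbeats 1000000 in
theorem check_caste_eligibility_spec : Claim_equal_check_caste_eligibility := by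
  intro user_caste st _
  unfold Spec_check_caste_eligibility
  simp only [check_caste_eligibility, check_caste_eligibility_alt]
  generalize PySem.Str.strip (PySem.Str.upper user_caste) = u0
  set u := if u0 == "BC" then "OBC" else u0 with hu
  have hgen : (pvScan st).contains none = pvGeneralKeywords.any (fun k => PySem.Str.isIn k st) := by
    rw [Bool.eq_iff_iff]
    simp only [PySem.Set.contains]
    rw [List.contains_iff_mem, pv_scan_none, List.any_eq_true]
  have huser : (pvScan st).contains (some u) =
      ((pvCasteKeywords.filter (fun q => q.2.any (fun k => PySem.Str.isIn k st))).map
        Prod.fst).contains u := by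
    rw [Bool.eq_iff_iff]
    simp only [PySem.Set.contains]
    rw [List.contains_iff_mem, List.contains_iff_mem, pv_scan_some]
    simp only [List.mem_map, List.mem_filter]
    constructor
    · rintro ⟨q, hq, ha, he⟩; exact ⟨q, ⟨hq, ha⟩, he⟩
    · rintro ⟨q, ⟨hq, ha⟩, he⟩; exact ⟨q, hq, ha, he⟩
  rw [PySem.List.foldl_append_if (fun q => q.2.any (fun k => PySem.Str.isIn k st)) Prod.fst
    pvCasteKeywords []]
  simp only [List.nil_append]
  by_cases hg : pvGeneralKeywords.any (fun k => PySem.Str.isIn k st) = true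
  · rw [hgen, if_pos hg, if_pos hg]
  · rw [hgen, if_neg hg, if_neg hg]
    by_cases hm : ((pvCasteKeywords.filter (fun q => q.2.any (fun k => PySem.Str.isIn k st))).map
        Prod.fst) = []
    · -- no caste keyword matches: A returns true; B's tag set is empty
      have hscan : pvScan st = [] := by
        rw [List.eq_nil_iff_forall_not_mem]
        intro t ht
        cases t with
        | none =>
          rw [pv_scan_none] at ht
          exact hg (List.any_eq_true.2 ht)
        | some c =>
          obtain ⟨q, hq, ha, rfl⟩ := (pv_scan_some st c).1 ht
          have : q.1 ∈ ((pvCasteKeywords.filter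
              (fun q => q.2.any (fun k => PySem.Str.isIn k st))).map Prod.fst) :=
            List.mem_map.2 ⟨q, List.mem_filter.2 ⟨hq, ha⟩, rfl⟩
          rw [hm] at this
          exact List.not_mem_nil this
      rw [hm, huser, hm, hscan]
      simp
    · -- some caste keyword matches: both sides reduce to the membership test
      have hne : (pvScan st).isEmpty = false := by
        obtain ⟨x, hx⟩ := List.exists_mem_of_ne_nil _ hm
        obtain ⟨q, hqf, rfl⟩ := List.mem_map.1 hx
        have hq := List.mem_filter.1 hqf
        have hmem : some q.1 ∈ pvScan st := (pv_scan_some st q.1).2 ⟨q, hq.1, hq.2, rfl⟩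
        cases h : (pvScan st).isEmpty
        · rfl
        · rw [List.isEmpty_iff] at h
          rw [h] at hmem
          exact absurd hmem List.not_mem_nil
      have him : (((pvCasteKeywords.filter
          (fun q => q.2.any (fun k => PySem.Str.isIn k st))).map Prod.fst)).isEmpty = false := by
        simpa [List.isEmpty_iff] using hm
      rw [him, huser, hne]
      cases ((pvCasteKeywords.filter (fun q => q.2.any (fun k => PySem.Str.isIn k st))).map
        Prod.fst).contains u <;> simp
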